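-- pv_equiv track=rewrite | github.com/babyview-project/object-detection | preprocessing/make_category_rsa.py | sort_categories
-- ===== SOURCE A (Python) =====
-- from typing import Dict, List
--
-- def sort_categories(categories: List[str], category_types: Dict[str, Dict[str, bool]]) -> List[str]:
--     """Sort categories by type (animate -> small -> big -> others)"""
--     # Create category groups
--     animate = []
--     small = []
--     big = []
--     others = []
--
--     for cat in categories:
--         if cat not in category_types:
--             others.append(cat)
--             continue
--
--         types = category_types[cat]
--         if types['is_animate']:
--             animate.append(cat)
--         elif types['is_small']:
--             small.append(cat)
--         elif types['is_big']:
--             big.append(cat)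
--         else:
--             others.append(cat)
--
--     # Sort within each group alphabetically
--     return sorted(animate) + sorted(small) + sorted(big) + sorted(others)
-- ===== SOURCE B (Python) =====
-- from typing import Dict, List
--
-- def sort_categories(categories: List[str], category_types: Dict[str, Dict[str, bool]]) -> List[str]:
--     """Sort categories by type (animate -> small -> big -> others) via one keyed sort."""
--     def group_index(cat: str) -> int:
--         if cat not in category_types:
--             return 3
--         types = category_types[cat]
--         if types['is_animate']:
--             return 0
--         elif types['is_small']:
--             return 1
--         elif types['is_big']:
--             return 2
--         return 3
--     return sorted(categories, key=lambda cat: (group_index(cat), cat))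
-- ===== Notes on version B (the rewrite author's own statement) =====
-- stated objective: simpler
-- what changed: Replaces the four-way partition into separate lists, four sorts and a concatenation with a single sorted() call keyed by the tuple (group_index(cat), cat), where group_index reads the same dict entries in the same short-circuit order.
import Mathlib
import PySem

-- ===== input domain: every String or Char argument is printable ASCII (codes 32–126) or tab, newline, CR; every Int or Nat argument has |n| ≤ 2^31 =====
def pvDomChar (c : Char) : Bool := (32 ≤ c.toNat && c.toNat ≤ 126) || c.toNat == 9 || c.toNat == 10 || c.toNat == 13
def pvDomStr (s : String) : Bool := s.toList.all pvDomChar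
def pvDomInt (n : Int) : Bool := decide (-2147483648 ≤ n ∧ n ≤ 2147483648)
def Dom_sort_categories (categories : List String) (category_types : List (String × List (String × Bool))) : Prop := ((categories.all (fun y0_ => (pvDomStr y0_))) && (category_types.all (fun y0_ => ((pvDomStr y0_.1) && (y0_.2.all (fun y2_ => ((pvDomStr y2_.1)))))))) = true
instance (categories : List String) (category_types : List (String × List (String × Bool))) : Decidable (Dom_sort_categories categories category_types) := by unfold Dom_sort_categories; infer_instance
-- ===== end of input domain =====

-- B replaces A's partition-into-four-lists + four sorts + concatenation with a single
-- keyed sort on the tuple (group index, name); objective: simpler.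


-- ===== PORT A =====
-- the four-accumulator loop; where Python raises KeyError (a needed 'is_animate'/'is_small'/
-- 'is_big' key missing) Pre_ excludes the input, so the lookups may use getD false there
def sort_categories (categories : List String) (category_types : List (String × List (String × Bool))) : List String :=
  let s := categories.foldl
    (fun (s : List String × List String × List String × List String) cat =>
      match List.lookup cat category_types with
      | none => (s.1, s.2.1, s.2.2.1, s.2.2.2 ++ [cat])
      | some types =>
        if (List.lookup "is_animate" types).getD false then (s.1 ++ [cat], s.2.1, s.2.2.1, s.2.2.2)
        else if (List.lookup "is_small" types).getD false then (s.1, s.2.1 ++ [cat], s.2.2.1, s.2.2.2)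
        else if (List.lookup "is_big" types).getD false then (s.1, s.2.1, s.2.2.1 ++ [cat], s.2.2.2)
        else (s.1, s.2.1, s.2.2.1, s.2.2.2 ++ [cat]))
    ([], [], [], [])
  PySem.List.sorted s.1 (fun x => x) ++ PySem.List.sorted s.2.1 (fun x => x) ++
    PySem.List.sorted s.2.2.1 (fun x => x) ++ PySem.List.sorted s.2.2.2 (fun x => x)

-- ===== PORT B =====
def pvGroupIndex (category_types : List (String × List (String × Bool))) (cat : String) : Int :=
  match List.lookup cat category_types with
  | none => 3
  | some types =>
    if (List.lookup "is_animate" types).getD false then 0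
    else if (List.lookup "is_small" types).getD false then 1
    else if (List.lookup "is_big" types).getD false then 2
    else 3

def sort_categories_alt (categories : List String) (category_types : List (String × List (String × Bool))) : List String :=
  PySem.List.sorted2 categories (pvGroupIndex category_types) (fun cat => cat)

-- ===== PRECONDITION & SPEC =====
-- Pre_ excludes exactly the inputs on which Python (A and B alike) raises KeyError: a category
-- present in category_types whose inner dict is missing a key the short-circuit chain reads.
def Pre_sort_categories (categories : List String) (category_types : List (String × List (String × Bool))) : Prop :=
  ∀ cat ∈ categories, ∀ types, List.lookup cat category_types = some types →
    (List.lookup "is_animate" types).isSome ∧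
    ((List.lookup "is_animate" types).getD false = false →
      (List.lookup "is_small" types).isSome ∧
      ((List.lookup "is_small" types).getD false = false →
        (List.lookup "is_big" types).isSome))
instance (categories : List String) (category_types : List (String × List (String × Bool))) : Decidable (Pre_sort_categories categories category_types) := by unfold Pre_sort_categories; infer_instance

def pvWitness_sort_categories : List String × (List (String × List (String × Bool))) :=
  (["dog", "cup", "dog"], [("dog", [("is_animate", true)]), ("cup", [("is_animate", false), ("is_small", true)])])

def Spec_sort_categories (categories : List String) (category_types : List (String × List (String × Bool))) (out : List String) : Prop := out = sort_categories_alt categories category_types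
instance (categories : List String) (category_types : List (String × List (String × Bool))) (out : List String) : Decidable (Spec_sort_categories categories category_types out) := by unfold Spec_sort_categories; infer_instance

-- ===== CLAIM (what is proved, stated in full; the proofs are below) =====
def Claim_equal_sort_categories : Prop := ∀ (categories : List String) (category_types : List (String × List (String × Bool))), Dom_sort_categories categories category_types → Pre_sort_categories categories category_types → Spec_sort_categories categories category_types (sort_categories categories category_types)

-- ===== LEMMAS AND PROOFS =====

-- the lexicographic key B's single sort orders by
def pvKey (category_types : List (String × List (String × Bool))) (cat : String) : Int ×ₗ String :=
  toLex (pvGroupIndex category_types cat, cat)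

theorem pvKey_injective (ct : List (String × List (String × Bool))) : Function.Injective (pvKey ct) := by
  intro a b h
  exact congrArg (fun p => (ofLex p).2) h

theorem pvGroupIndex_range (ct : List (String × List (String × Bool))) (cat : String) :
    pvGroupIndex ct cat = 0 ∨ pvGroupIndex ct cat = 1 ∨ pvGroupIndex ct cat = 2 ∨ pvGroupIndex ct cat = 3 := by
  unfold pvGroupIndex
  rcases List.lookup cat ct with _ | types
  · simp
  · simp only
    split_ifs <;> simp

-- sorted2 with keys (k1, id) is sorted with the corresponding lexicographic key
theorem sorted2_eq_sorted_lex (xs : List String) (k1 : String → Int) :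
    PySem.List.sorted2 xs k1 (fun x => x) = PySem.List.sorted xs (fun x => (toLex (k1 x, x) : Int ×ₗ String)) := by
  unfold PySem.List.sorted2 PySem.List.sorted
  simp only [if_neg Bool.false_ne_true]
  congr 1
  funext acc x
  congr 1
  funext a b
  rcases lt_trichotomy (k1 a) (k1 b) with h | h | h <;>
    simp [Prod.Lex.lt_iff, h, lt_asymm, ne_of_lt]

-- A's partition loop produces the four filters by group index
theorem partition_eq_filters (ct : List (String × List (String × Bool))) (l : List String)
    (a s b o : List String) :
    l.foldl
      (fun (st : List String × List String × List String × List String) cat =>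
        match List.lookup cat ct with
        | none => (st.1, st.2.1, st.2.2.1, st.2.2.2 ++ [cat])
        | some types =>
          if (List.lookup "is_animate" types).getD false then (st.1 ++ [cat], st.2.1, st.2.2.1, st.2.2.2)
          else if (List.lookup "is_small" types).getD false then (st.1, st.2.1 ++ [cat], st.2.2.1, st.2.2.2)
          else if (List.lookup "is_big" types).getD false then (st.1, st.2.1, st.2.2.1 ++ [cat], st.2.2.2)
          else (st.1, st.2.1, st.2.2.1, st.2.2.2 ++ [cat]))
      (a, s, b, o)
    = (a ++ l.filter (fun c => pvGroupIndex ct c == 0),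
       s ++ l.filter (fun c => pvGroupIndex ct c == 1),
       b ++ l.filter (fun c => pvGroupIndex ct c == 2),
       o ++ l.filter (fun c => pvGroupIndex ct c == 3)) := by
  induction l generalizing a s b o with
  | nil => simp
  | cons x t ih =>
    simp only [List.foldl_cons]
    rcases hx : List.lookup x ct with _ | types
    · have hg : pvGroupIndex ct x = 3 := by unfold pvGroupIndex; rw [hx]
      simp [hx, ih, hg, List.filter_cons]
    · by_cases h1 : (List.lookup "is_animate" types).getD false = true
      · have hg : pvGroupIndex ct x = 0 := by unfold pvGroupIndex; rw [hx]; simp [h1]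
        simp [hx, h1, ih, hg, List.filter_cons]
      · by_cases h2 : (List.lookup "is_small" types).getD false = true
        · have hg : pvGroupIndex ct x = 1 := by unfold pvGroupIndex; rw [hx]; simp [h1, h2]
          simp [hx, h1, h2, ih, hg, List.filter_cons]
        · by_cases h3 : (List.lookup "is_big" types).getD false = true
          · have hg : pvGroupIndex ct x = 2 := by unfold pvGroupIndex; rw [hx]; simp [h1, h2, h3]
            simp [hx, h1, h2, h3, ih, hg, List.filter_cons]
          · have hg : pvGroupIndex ct x = 3 := by unfold pvGroupIndex; rw [hx]; simp [h1, h2, h3]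
            simp [hx, h1, h2, h3, ih, hg, List.filter_cons]

-- the four filters together are a permutation of the list
theorem filters_perm (ct : List (String × List (String × Bool))) (l : List String) :
    (l.filter (fun c => pvGroupIndex ct c == 0) ++ l.filter (fun c => pvGroupIndex ct c == 1) ++
     l.filter (fun c => pvGroupIndex ct c == 2) ++ l.filter (fun c => pvGroupIndex ct c == 3)).Perm l := by
  induction l with
  | nil => simp
  | cons x t ih =>
    rcases pvGroupIndex_range ct x with h | h | h | h <;> simp only [List.filter_cons, h] <;> norm_num
    · simpa using ih.cons x
    · exact List.perm_middle.trans (by simpa [List.append_assoc] using ih.cons x)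
    · rw [← List.append_assoc]
      exact List.perm_middle.trans (by simpa [List.append_assoc] using ih.cons x)
    · rw [← List.append_assoc, ← List.append_assoc]
      exact List.perm_middle.trans (by simpa [List.append_assoc] using ih.cons x)

-- every element of a sorted group-i filter really has group index i
theorem mem_sorted_filter (ct : List (String × List (String × Bool))) (l : List String) (i : Int) (x : String)
    (hx : x ∈ PySem.List.sorted (l.filter (fun c => pvGroupIndex ct c == i)) (fun z => z)) :
    pvGroupIndex ct x = i := by
  rw [PySem.List.mem_sorted] at hx
  simpa using (List.mem_filter.mp hx).2

theorem pvKey_le_of_lt (ct : List (String × List (String × Bool))) {a b : String} {i j : Int}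
    (ha : pvGroupIndex ct a = i) (hb : pvGroupIndex ct b = j) (hij : i < j) : pvKey ct a ≤ pvKey ct b := by
  unfold pvKey
  rw [Prod.Lex.le_iff]
  left
  simpa [ha, hb] using hij

theorem pvKey_le_of_eq (ct : List (String × List (String × Bool))) {a b : String} {i : Int}
    (ha : pvGroupIndex ct a = i) (hb : pvGroupIndex ct b = i) (hab : a ≤ b) : pvKey ct a ≤ pvKey ct b := by
  unfold pvKey
  rw [Prod.Lex.le_iff]
  right
  exact ⟨by simp [ha, hb], hab⟩

theorem block_pairwise (ct : List (String × List (String × Bool))) (l : List String) (i : Int) :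
    List.Pairwise (fun a b => pvKey ct a ≤ pvKey ct b)
      (PySem.List.sorted (l.filter (fun c => pvGroupIndex ct c == i)) (fun z => z)) := by
  refine (PySem.List.sorted_pairwise (l.filter (fun c => pvGroupIndex ct c == i)) (fun z => z)).imp_of_mem ?_
  intro a b ha hb hle
  exact pvKey_le_of_eq ct (mem_sorted_filter ct l i a ha) (mem_sorted_filter ct l i b hb) hle

-- ===== VERDICT (by name: the statement is the Claim_ definition above) =====
theorem sort_categories_spec : Claim_equal_sort_categories := by
  intro c ct _ _
  unfold Spec_sort_categories sort_categories sort_categories_alt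
  rw [sorted2_eq_sorted_lex, partition_eq_filters]
  simp only [List.nil_append]
  have hB : PySem.List.sorted c (fun x => (toLex (pvGroupIndex ct x, x) : Int ×ₗ String))
      = PySem.List.sorted c (pvKey ct) := rfl
  rw [hB]
  refine PySem.List.eq_of_perm_of_pairwise_le_of_injective (pvKey ct) (pvKey_injective ct) ?_ ?_ ?_
  · refine List.Perm.trans ?_ (PySem.List.sorted_perm c (pvKey ct) false).symm
    refine List.Perm.trans ?_ (filters_perm ct c)
    exact ((((PySem.List.sorted_perm _ _ false).append (PySem.List.sorted_perm _ _ false)).append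
      (PySem.List.sorted_perm _ _ false)).append (PySem.List.sorted_perm _ _ false))
  · simp only [List.pairwise_append]
    refine ⟨⟨⟨block_pairwise ct c 0, block_pairwise ct c 1, ?_⟩, block_pairwise ct c 2, ?_⟩,
      block_pairwise ct c 3, ?_⟩
    · intro a ha b hb
      exact pvKey_le_of_lt ct (mem_sorted_filter ct c 0 a ha) (mem_sorted_filter ct c 1 b hb) (by norm_num)
    · intro a ha b hb
      rcases List.mem_append.mp ha with ha | ha
      · exact pvKey_le_of_lt ct (mem_sorted_filter ct c 0 a ha) (mem_sorted_filter ct c 2 b hb) (by norm_num)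
      · exact pvKey_le_of_lt ct (mem_sorted_filter ct c 1 a ha) (mem_sorted_filter ct c 2 b hb) (by norm_num)
    · intro a ha b hb
      rcases List.mem_append.mp ha with ha | ha
      · rcases List.mem_append.mp ha with ha | ha
        · exact pvKey_le_of_lt ct (mem_sorted_filter ct c 0 a ha) (mem_sorted_filter ct c 3 b hb) (by norm_num)
        · exact pvKey_le_of_lt ct (mem_sorted_filter ct c 1 a ha) (mem_sorted_filter ct c 3 b hb) (by norm_num)
      · exact pvKey_le_of_lt ct (mem_sorted_filter ct c 2 a ha) (mem_sorted_filter ct c 3 b hb) (by norm_num)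
  · exact PySem.List.sorted_pairwise c (pvKey ct)
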